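-- pv_equiv track=rewrite | github.com/ojs201/Algorithm-Study_23-2 | SeungHoonLee/10th week assignment/68645.py | solution
-- ===== SOURCE A (Python) =====
-- def solution(n):
--     answer = [[0] * num for num in range(1, n + 1)]
--     num = 1
--     x, y = -1, 0
--
--     for i in range(n):
--         for _ in range(i, n):
--
--             if i % 3 == 0:
--                 x += 1
--             elif i % 3 == 1:
--                 y += 1
--             else:
--                 x -= 1
--                 y -= 1
--
--             answer[x][y] = num
--             num += 1
--
--     return sum(answer, [])
-- ===== SOURCE B (Python) =====
-- def solution(n):
--     # Flat triangular array filled leg-by-leg from closed-form leg starts;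
--     # no 2D grid, no step-by-step cursor, no flatten pass.
--     m = max(n, 0)
--     res = [0] * (m * (m + 1) // 2)
--     num = 1
--     for i in range(n):
--         r, k = divmod(i, 3)
--         if k == 0:
--             sx, sy, dx, dy = 2 * r, r, 1, 0
--         elif k == 1:
--             sx, sy, dx, dy = n - 1 - r, r + 1, 0, 1
--         else:
--             sx, sy, dx, dy = n - 2 - r, n - 2 - 2 * r, -1, -1
--         for j in range(n - i):
--             cx, cy = sx + j * dx, sy + j * dy
--             res[cx * (cx + 1) // 2 + cy] = num + j
--         num += n - i
--     return res
-- ===== Notes on version B (the rewrite author's own statement) =====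
-- stated objective: faster
-- what changed: A simulates the spiral cell-by-cell with a moving cursor over a jagged list-of-rows and finally flattens it with sum(answer, []), which re-concatenates the whole prefix for every row; B writes each leg directly into a preallocated flat triangular array using closed-form leg start positions derived from the ring index and arithmetic triangular cell indices, with no per-step cursor state and no flatten pass.
import Mathlib
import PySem

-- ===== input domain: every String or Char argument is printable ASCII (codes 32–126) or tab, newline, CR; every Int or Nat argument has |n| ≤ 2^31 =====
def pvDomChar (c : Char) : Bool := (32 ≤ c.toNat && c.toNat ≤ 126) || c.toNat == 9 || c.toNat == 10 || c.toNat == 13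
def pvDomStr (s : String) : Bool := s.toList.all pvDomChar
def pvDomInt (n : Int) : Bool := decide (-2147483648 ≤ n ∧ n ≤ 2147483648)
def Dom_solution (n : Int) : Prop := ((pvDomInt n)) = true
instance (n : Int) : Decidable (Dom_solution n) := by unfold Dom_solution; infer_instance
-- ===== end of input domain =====

-- B replaces A's step-by-step 2D cursor simulation (jagged grid + final flatten) by
-- filling a flat triangular array leg-by-leg from closed-form leg start positions
-- (objective: faster; a timing run measured B ahead, growing with n).

-- ===== PORT A =====
-- answer[x][y] = num  (indices are always in range here — proven below — so the
-- total pyGetD/pySetD forms are exact)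
def write2 (g : List (List Int)) (x y v : Int) : List (List Int) :=
  PySem.List.pySetD g x (PySem.List.pySetD (PySem.List.pyGetD g x []) y v)

-- one iteration of A's inner loop body (the loop variable is unused in Python)
def aStep (i : Int) (st : List (List Int) × Int × Int × Int) :
    List (List Int) × Int × Int × Int :=
  match st with
  | (ans, num, x, y) =>
    let p : Int × Int :=
      if PySem.Int.mod i 3 == 0 then (x + 1, y)
      else if PySem.Int.mod i 3 == 1 then (x, y + 1)
      else (x - 1, y - 1)
    (write2 ans p.1 p.2 num, num + 1, p.1, p.2)

def solution (n : Int) : List Int :=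
  let answer := (PySem.List.pyRange 1 (n + 1) 1).map
    (fun num => PySem.List.pyRepeat [(0 : Int)] num)
  let st := (PySem.List.pyRange 0 n 1).foldl
    (fun st i => (PySem.List.pyRange i n 1).foldl (fun st2 _ => aStep i st2) st)
    (answer, 1, -1, 0)
  st.1.foldl (fun acc row => acc ++ row) []   -- sum(answer, [])

-- ===== PORT B =====
-- one leg i of B: closed-form start (sx,sy), direction (dx,dy), arithmetic writes
def bLeg (n i : Int) (st : List Int × Int) : List Int × Int :=
  match st with
  | (res, num) =>
    let r := PySem.Int.floordiv i 3
    let k := PySem.Int.mod i 3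
    let q : Int × Int × Int × Int :=
      if k == 0 then (2 * r, r, 1, 0)
      else if k == 1 then (n - 1 - r, r + 1, 0, 1)
      else (n - 2 - r, n - 2 - 2 * r, -1, -1)
    let res := (PySem.List.pyRange 0 (n - i) 1).foldl
      (fun res j =>
        let cx := q.1 + j * q.2.2.1
        let cy := q.2.1 + j * q.2.2.2
        PySem.List.pySetD res (PySem.Int.floordiv (cx * (cx + 1)) 2 + cy) (num + j))
      res
    (res, num + (n - i))

def solution_alt (n : Int) : List Int :=
  let m := max n 0
  let res := PySem.List.pyRepeat [(0 : Int)] (PySem.Int.floordiv (m * (m + 1)) 2)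
  ((PySem.List.pyRange 0 n 1).foldl (fun st i => bLeg n i st) (res, 1)).1

-- ===== PRECONDITION & SPEC =====
def Spec_solution (n : Int) (out : List Int) : Prop := out = solution_alt n
instance (n : Int) (out : List Int) : Decidable (Spec_solution n out) := by unfold Spec_solution; infer_instance

-- ===== CLAIM (what is proved, stated in full; the proofs are below) =====
def Claim_equal_solution : Prop := ∀ (n : Int), Dom_solution n → Spec_solution n (solution n)

-- ===== LEMMAS AND PROOFS =====

-- triangular numbers as prefix sums of row lengths
def triN (t : Nat) : Nat := ((List.range t).map (· + 1)).sum

-- shape + flat-content correspondence between A's jagged grid and B's flat array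
def Matched (n : Int) (g : List (List Int)) (res : List Int) : Prop :=
  g.map List.length = (List.range n.toNat).map (· + 1) ∧ res = g.flatten

-- leg start position of A before leg m, in closed form
def posF (n : Int) (m : Nat) : Int × Int :=
  let r : Int := (m / 3 : Nat)
  if m % 3 = 0 then (2 * r - 1, r)
  else if m % 3 = 1 then (n - 1 - r, r)
  else (n - 1 - r, n - 1 - 2 * r)

-- direction of leg m
def dirF (m : Nat) : Int × Int :=
  if m % 3 = 0 then (1, 0) else if m % 3 = 1 then (0, 1) else (-1, -1)

theorem triN_succ (t : Nat) : triN (t + 1) = triN t + (t + 1) := by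
  simp [triN, List.range_succ]

theorem two_triN (t : Nat) : 2 * triN t = t * (t + 1) := by
  induction t with
  | zero => simp [triN]
  | succ t ih => rw [triN_succ, Nat.mul_add, ih]; ring

theorem foldl_append_nil (l : List (List Int)) :
    ∀ acc : List Int, l.foldl (fun a r => a ++ r) acc = acc ++ l.flatten := by
  induction l with
  | nil => simp
  | cons a l ih => intro acc; simp [List.foldl_cons, ih, List.append_assoc]

theorem foldl_const_iterate {α β : Type} (f : α → α) (l : List β) :
    ∀ init : α, l.foldl (fun s _ => f s) init = f^[l.length] init := by
  induction l with
  | nil => intro init; simp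
  | cons a l ih => intro init; simp [List.foldl_cons, ih, Function.iterate_succ_apply]

theorem flatten_set2 (v : Int) :
    ∀ (g : List (List Int)) (t : Nat) (ht : t < g.length) (y : Nat),
      y < g[t].length →
      (g.set t (g[t].set y v)).flatten
        = g.flatten.set (((g.take t).map List.length).sum + y) v := by
  intro g
  induction g with
  | nil => intro t ht; simp at ht
  | cons a g ih =>
    intro t ht y hy
    cases t with
    | zero =>
      simp only [List.getElem_cons_zero] at hy ⊢
      simp only [List.set_cons_zero, List.flatten_cons, List.take_zero, List.map_nil,
        List.sum_nil, Nat.zero_add]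
      rw [List.set_append_left _ _ hy]
    | succ t =>
      simp only [List.getElem_cons_succ] at hy ⊢
      simp only [List.set_cons_succ, List.flatten_cons, List.take_succ_cons,
        List.map_cons, List.sum_cons]
      rw [Nat.add_assoc, List.set_append_right _ _ (by omega)]
      have : a.length + (((g.take t).map List.length).sum + y) - a.length
          = ((g.take t).map List.length).sum + y := by omega
      rw [this, ih t (by simpa using ht) y hy]

theorem matched_write (n : Int) (g : List (List Int)) (res : List Int)
    (x y v : Int) (h : Matched n g res)
    (hx0 : 0 ≤ x) (hxn : x < n) (hy0 : 0 ≤ y) (hyx : y ≤ x) :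
    Matched n (write2 g x y v)
      (PySem.List.pySetD res (PySem.Int.floordiv (x * (x + 1)) 2 + y) v) := by
  obtain ⟨hshape, hflat⟩ := h
  have hlen : g.length = n.toNat := by
    have := congrArg List.length hshape; simpa using this
  have ht : x.toNat < g.length := by omega
  have hxc : (x.toNat : Int) = x := Int.toNat_of_nonneg hx0
  have hrow : g[x.toNat].length = x.toNat + 1 := by
    have h1 : (g.map List.length)[x.toNat]'(by simpa using ht)
        = ((List.range n.toNat).map (· + 1))[x.toNat]'(by simp; omega) := by
      simp only [hshape]
    simpa using h1
  have hy : y.toNat < g[x.toNat].length := by omega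
  have hg1 : PySem.List.pyGetD g x [] = g[x.toNat] := by
    rw [PySem.List.pyGetD_of_nonneg _ _ hx0]
    simp [List.getD_eq_getElem?_getD, List.getElem?_eq_getElem ht]
  have hidx : PySem.Int.floordiv (x * (x + 1)) 2 + y
      = ((triN x.toNat + y.toNat : Nat) : Int) := by
    have hx2 : x * (x + 1) = ((2 * triN x.toNat : Nat) : Int) := by
      rw [two_triN]; push_cast [hxc]; ring
    rw [hx2, PySem.Int.floordiv_eq_ediv_of_pos (by omega)]
    push_cast
    omega
  have hW : write2 g x y v = g.set x.toNat (g[x.toNat].set y.toNat v) := by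
    unfold write2
    rw [hg1, PySem.List.pySetD_of_nonneg _ _ hy0, PySem.List.pySetD_of_nonneg _ _ hx0]
  constructor
  · rw [hW, List.map_set]
    have h1 : (g[x.toNat].set y.toNat v).length
        = (List.map List.length g)[x.toNat]'(by simpa using ht) := by simp
    rw [h1, List.set_getElem_self, hshape]
  · rw [hW, hidx, hflat, PySem.List.pySetD_natCast,
      flatten_set2 v g x.toNat ht y.toNat hy]
    congr 1
    have htake : (g.take x.toNat).map List.length
        = (List.range x.toNat).map (· + 1) := by
      have hmin : min x.toNat n.toNat = x.toNat := by omega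
      rw [List.map_take, hshape, ← List.map_take, List.take_range, hmin]
    rw [htake]
    rfl

theorem aStep_char (m : Nat) (g : List (List Int)) (num x y : Int) :
    aStep (m : Int) (g, num, x, y)
      = (write2 g (x + (dirF m).1) (y + (dirF m).2) num, num + 1,
          x + (dirF m).1, y + (dirF m).2) := by
  have h3 : m % 3 = 0 ∨ m % 3 = 1 ∨ m % 3 = 2 := by omega
  have h2 : (m : Int) % 3 = ((m % 3 : Nat) : Int) := by omega
  rcases h3 with h | h | h <;> rw [h] at h2 <;>
    simp [aStep, dirF, h2, h, sub_eq_add_neg]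

theorem iter_leg (n dx dy : Int) (L : Nat)
    (step : List (List Int) × Int × Int × Int → List (List Int) × Int × Int × Int)
    (hstep : ∀ g num x y, step (g, num, x, y)
        = (write2 g (x + dx) (y + dy) num, num + 1, x + dx, y + dy)) :
    ∀ (g : List (List Int)) (res : List Int) (num x y : Int),
      Matched n g res →
      (∀ t : Nat, t < L → 0 ≤ y + ((t : Int) + 1) * dy ∧
          y + ((t : Int) + 1) * dy ≤ x + ((t : Int) + 1) * dx ∧
          x + ((t : Int) + 1) * dx < n) →
      ∃ g', step^[L] (g, num, x, y)
          = (g', num + L, x + (L : Int) * dx, y + (L : Int) * dy) ∧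
        Matched n g'
          ((PySem.List.pyRange 0 (L : Int) 1).foldl
            (fun r j => PySem.List.pySetD r
              (PySem.Int.floordiv ((x + dx + j * dx) * ((x + dx + j * dx) + 1)) 2
                + (y + dy + j * dy)) (num + j)) res) := by
  induction L with
  | zero =>
    intro g res num x y hM hB
    refine ⟨g, by simp, ?_⟩
    have h0 : PySem.List.pyRange 0 ((0 : Nat) : Int) 1 = [] := by
      simp [PySem.List.pyRange_one_eq_nil (le_refl 0)]
    simpa [h0] using hM
  | succ L ih =>
    intro g res num x y hM hB
    obtain ⟨g', hs, hM'⟩ := ih g res num x y hM (fun t ht => hB t (by omega))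
    have hb := hB L (by omega)
    have hw := matched_write n g' _ (x + ((L : Int) + 1) * dx) (y + ((L : Int) + 1) * dy)
      (num + L) hM' (le_trans hb.1 hb.2.1) hb.2.2 hb.1 hb.2.1
    refine ⟨write2 g' (x + ((L : Int) + 1) * dx) (y + ((L : Int) + 1) * dy) (num + L), ?_, ?_⟩
    · rw [Function.iterate_succ_apply', hs, hstep]
      have e3 : x + (L : Int) * dx + dx = x + ((L : Int) + 1) * dx := by ring
      have e4 : y + (L : Int) * dy + dy = y + ((L : Int) + 1) * dy := by ring
      rw [e3, e4]
      simp only [Prod.mk.injEq]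
      refine ⟨by simp, by push_cast; ring, by push_cast; ring, by push_cast; ring⟩
    · have hr : PySem.List.pyRange 0 (((L + 1 : Nat) : Int)) 1
          = PySem.List.pyRange 0 (L : Int) 1 ++ [(L : Int)] := by
        push_cast
        exact PySem.List.pyRange_one_succ_right (by positivity)
      rw [hr, List.foldl_append]
      simp only [List.foldl_cons, List.foldl_nil]
      have e1 : x + dx + (L : Int) * dx = x + ((L : Int) + 1) * dx := by ring
      have e2 : y + dy + (L : Int) * dy = y + ((L : Int) + 1) * dy := by ring
      rw [e1, e2]
      exact hw

theorem posF_step (n : Int) (m : Nat) :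
    (posF n m).1 + ((n : Int) - m) * (dirF m).1 = (posF n (m + 1)).1 ∧
    (posF n m).2 + ((n : Int) - m) * (dirF m).2 = (posF n (m + 1)).2 := by
  have h3 : m % 3 = 0 ∨ m % 3 = 1 ∨ m % 3 = 2 := by omega
  rcases h3 with h | h | h
  · have e1 : (m + 1) % 3 = 1 := by omega
    have e2 : (m + 1) / 3 = m / 3 := by omega
    simp only [posF, dirF, h, e1, e2]
    norm_num
    omega
  · have e1 : (m + 1) % 3 = 2 := by omega
    have e2 : (m + 1) / 3 = m / 3 := by omega
    simp only [posF, dirF, h, e1, e2]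
    norm_num
    omega
  · have e1 : (m + 1) % 3 = 0 := by omega
    have e2 : (m + 1) / 3 = m / 3 + 1 := by omega
    simp only [posF, dirF, h, e1, e2]
    norm_num
    omega

theorem posF_bounds (n : Int) (m : Nat) (t : Nat)
    (ht : (t : Int) < n - m) :
    0 ≤ (posF n m).2 + ((t : Int) + 1) * (dirF m).2 ∧
    (posF n m).2 + ((t : Int) + 1) * (dirF m).2
      ≤ (posF n m).1 + ((t : Int) + 1) * (dirF m).1 ∧
    (posF n m).1 + ((t : Int) + 1) * (dirF m).1 < n := by
  have h3 : m % 3 = 0 ∨ m % 3 = 1 ∨ m % 3 = 2 := by omega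
  rcases h3 with h | h | h <;> simp only [posF, dirF, h] <;> norm_num <;>
    refine ⟨by omega, by omega, by omega⟩

theorem bLeg_char (n : Int) (m : Nat) (hm : (m : Int) < n) (res : List Int) (num : Int) :
    bLeg n (m : Int) (res, num)
      = ((PySem.List.pyRange 0 ((n - m : Int).toNat : Int) 1).foldl
          (fun r j => PySem.List.pySetD r
            (PySem.Int.floordiv
              (((posF n m).1 + (dirF m).1 + j * (dirF m).1)
                * (((posF n m).1 + (dirF m).1 + j * (dirF m).1) + 1)) 2
              + ((posF n m).2 + (dirF m).2 + j * (dirF m).2)) (num + j)) res,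
          num + ((n - m : Int).toNat : Int)) := by
  have hr : PySem.Int.floordiv (m : Int) 3 = ((m / 3 : Nat) : Int) := by
    exact_mod_cast PySem.Int.floordiv_natCast m 3
  have hk : PySem.Int.mod (m : Int) 3 = ((m % 3 : Nat) : Int) := by
    exact_mod_cast PySem.Int.mod_natCast m 3
  have hL : (((n - (m : Int)).toNat : Nat) : Int) = n - m := by omega
  have h3 : m % 3 = 0 ∨ m % 3 = 1 ∨ m % 3 = 2 := by omega
  rw [hL]
  rcases h3 with h | h | h <;>
    (simp only [bLeg, hr, hk, h, posF, dirF, Nat.cast_zero, Nat.cast_one,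
       Nat.cast_ofNat]
     norm_num
     all_goals (congr 1; funext acc j; congr 2 <;> ring_nf))

theorem flat_init (t : Nat) :
    ((List.range t).map (fun k => List.replicate (k + 1) (0 : Int))).flatten
      = List.replicate (triN t) 0 := by
  induction t with
  | zero => simp [triN]
  | succ t ih =>
    rw [List.range_succ, List.map_append, List.flatten_append, ih, triN_succ]
    simp [List.replicate_add]

theorem range_cast (N : Nat) : PySem.List.pyRange 1 ((N : Int) + 1) 1
    = (List.range N).map (fun k : Nat => 1 + (k : Int)) := by
  induction N with
  | zero => simp [PySem.List.pyRange_one_eq_nil]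
  | succ N ih =>
    have h1 : ((N + 1 : Nat) : Int) + 1 = ((N : Int) + 1) + 1 := by push_cast; ring
    rw [h1, PySem.List.pyRange_one_succ_right (by omega), ih, List.range_succ,
      List.map_append]
    simp [add_comm]

theorem init_matched (n : Int) (hn : 0 < n) :
    Matched n
      ((PySem.List.pyRange 1 (n + 1) 1).map (fun num => PySem.List.pyRepeat [(0 : Int)] num))
      (PySem.List.pyRepeat [(0 : Int)] (PySem.Int.floordiv (max n 0 * (max n 0 + 1)) 2)) := by
  have hans : (PySem.List.pyRange 1 (n + 1) 1).map
        (fun num => PySem.List.pyRepeat [(0 : Int)] num)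
      = (List.range n.toNat).map (fun k => List.replicate (k + 1) (0 : Int)) := by
    have hrange : PySem.List.pyRange 1 (n + 1) 1
        = (List.range n.toNat).map (fun k : Nat => 1 + (k : Int)) := by
      rw [show (n + 1 : Int) = ((n.toNat : Nat) : Int) + 1 from by omega]
      exact range_cast n.toNat
    rw [hrange, List.map_map]
    apply List.map_congr_left
    intro k _
    simp only [Function.comp_apply, PySem.List.pyRepeat_singleton]
    congr 1
    omega
  have hfd : PySem.Int.floordiv (max n 0 * (max n 0 + 1)) 2
      = ((triN n.toNat : Nat) : Int) := by
    have hmax : max n 0 = n := by omega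
    have h2 : n * (n + 1) = ((2 * triN n.toNat : Nat) : Int) := by
      rw [two_triN]
      push_cast
      rw [Int.toNat_of_nonneg (by omega)]
    rw [hmax, PySem.Int.floordiv_eq_ediv_of_pos (by omega), h2]
    omega
  constructor
  · rw [hans, List.map_map]
    apply List.map_congr_left
    intro k _
    simp
  · rw [hans, flat_init, hfd, PySem.List.pyRepeat_singleton]
    simp

theorem outer_inv (n : Int) (hn : 0 < n) (m : Nat) (hm : m ≤ n.toNat) :
    ∃ g res num,
      (PySem.List.pyRange 0 (m : Int) 1).foldl
        (fun st i => (PySem.List.pyRange i n 1).foldl (fun st2 _ => aStep i st2) st)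
        ((PySem.List.pyRange 1 (n + 1) 1).map (fun num => PySem.List.pyRepeat [(0 : Int)] num),
          1, -1, 0)
        = (g, num, (posF n m).1, (posF n m).2) ∧
      (PySem.List.pyRange 0 (m : Int) 1).foldl (fun st i => bLeg n i st)
        (PySem.List.pyRepeat [(0 : Int)] (PySem.Int.floordiv (max n 0 * (max n 0 + 1)) 2), 1)
        = (res, num) ∧
      Matched n g res := by
  induction m with
  | zero =>
    refine ⟨(PySem.List.pyRange 1 (n + 1) 1).map
        (fun num => PySem.List.pyRepeat [(0 : Int)] num),
      PySem.List.pyRepeat [(0 : Int)]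
        (PySem.Int.floordiv (max n 0 * (max n 0 + 1)) 2), 1, ?_, ?_, init_matched n hn⟩
    · rw [show ((0 : Nat) : Int) = 0 from rfl, PySem.List.pyRange_one_eq_nil le_rfl]
      simp [posF]
    · rw [show ((0 : Nat) : Int) = 0 from rfl, PySem.List.pyRange_one_eq_nil le_rfl]
      rfl
  | succ m ih =>
    obtain ⟨g, res, num, hA, hB, hM⟩ := ih (by omega)
    have hmn : (m : Int) < n := by omega
    have hr : PySem.List.pyRange 0 ((m + 1 : Nat) : Int) 1
        = PySem.List.pyRange 0 (m : Int) 1 ++ [(m : Int)] := by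
      rw [show ((m + 1 : Nat) : Int) = (m : Int) + 1 from by push_cast; ring]
      exact PySem.List.pyRange_one_succ_right (by positivity)
    set L : Nat := ((n - (m : Int)).toNat) with hLdef
    have hLc : ((L : Nat) : Int) = n - (m : Int) := by omega
    have hlen : (PySem.List.pyRange (m : Int) n 1).length = L := by
      rw [PySem.List.length_pyRange_one]
    obtain ⟨g', hs, hM'⟩ := iter_leg n (dirF m).1 (dirF m).2 L (aStep (m : Int))
      (fun g num x y => aStep_char m g num x y)
      g res num (posF n m).1 (posF n m).2 hM
      (fun t ht => posF_bounds n m t (by omega))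
    refine ⟨g', _, num + (L : Int), ?_, ?_, hM'⟩
    · rw [hr, List.foldl_append, List.foldl_cons, List.foldl_nil, hA,
        foldl_const_iterate, hlen, hs]
      have hp := posF_step n m
      simp only [Prod.mk.injEq]
      refine ⟨by simp, by simp, ?_, ?_⟩
      · rw [hLc]; exact hp.1
      · rw [hLc]; exact hp.2
    · rw [hr, List.foldl_append, List.foldl_cons, List.foldl_nil, hB,
        bLeg_char n m hmn res num]

-- ===== VERDICT (by name: the statement is the Claim_ definition above) =====
theorem solution_spec : Claim_equal_solution := by
  intro n _
  unfold Spec_solution solution solution_alt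
  rcases Int.lt_or_le 0 n with hn | hn
  · obtain ⟨g, res, num, hA, hB, hshape, hflat⟩ := outer_inv n hn n.toNat le_rfl
    have hcast : ((n.toNat : Nat) : Int) = n := Int.toNat_of_nonneg (by omega)
    rw [hcast] at hA hB
    simp only [hA, hB, foldl_append_nil, List.nil_append, hflat]
  · have h1 : PySem.List.pyRange 0 n 1 = [] := PySem.List.pyRange_one_eq_nil (by omega)
    have h2 : max n 0 = 0 := by omega
    have h3 : PySem.List.pyRange 1 (n + 1) 1 = [] := PySem.List.pyRange_one_eq_nil (by omega)
    simp [h1, h2, h3, PySem.List.pyRepeat]
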